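-- pv_equiv track=rewrite | github.com/david-sweetenham/roll-it-bowl-it | competition_rules.py | _preferred_participants
-- ===== SOURCE A (Python) =====
-- INTERNATIONAL_PRIORITY = [
--     "Australia", "India", "England", "New Zealand", "South Africa",
--     "Pakistan", "Sri Lanka", "West Indies", "Bangladesh", "Afghanistan",
--     "Ireland", "Zimbabwe", "Scotland", "Netherlands", "Nepal", "Namibia",
--     "UAE", "Oman", "Canada", "USA", "Papua New Guinea", "Uganda",
-- ]
--
-- def _preferred_participants(team_ids, team_names, count):
--     named = {tid: team_names.get(tid, f"Team {tid}") for tid in team_ids}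
--     preferred = []
--     for name in INTERNATIONAL_PRIORITY:
--         for tid, team_name in named.items():
--             if team_name == name and tid not in preferred:
--                 preferred.append(tid)
--     for tid in sorted(team_ids, key=lambda x: named.get(x, "")):
--         if tid not in preferred:
--             preferred.append(tid)
--     return preferred[: min(len(preferred), count)]
-- ===== SOURCE B (Python) =====
-- INTERNATIONAL_PRIORITY = [
--     "Australia", "India", "England", "New Zealand", "South Africa",
--     "Pakistan", "Sri Lanka", "West Indies", "Bangladesh", "Afghanistan",
--     "Ireland", "Zimbabwe", "Scotland", "Netherlands", "Nepal", "Namibia",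
--     "UAE", "Oman", "Canada", "USA", "Papua New Guinea", "Uganda",
-- ]
--
-- def _preferred_participants(team_ids, team_names, count):
--     # Resolve each distinct team id's display name once, keeping first-occurrence order.
--     name_of = {}
--     order = []
--     for tid in team_ids:
--         if tid not in name_of:
--             name_of[tid] = team_names.get(tid, f"Team {tid}")
--             order.append(tid)
--     # Index ids by name so each priority name is a single O(1) lookup.
--     by_name = {}
--     for tid in order:
--         by_name.setdefault(name_of[tid], []).append(tid)
--     preferred = []
--     for name in INTERNATIONAL_PRIORITY:
--         preferred += by_name.get(name, [])
--     # Remaining ids, sorted by name; set membership instead of list scans.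
--     seen = set(preferred)
--     rest = []
--     for tid in sorted(team_ids, key=lambda t: name_of.get(t, "")):
--         if tid not in seen:
--             seen.add(tid)
--             rest.append(tid)
--     return (preferred + rest)[:count]
-- ===== Notes on version B (the rewrite author's own statement) =====
-- stated objective: faster
-- what changed: A's nested priority-by-dict scan and 'tid not in preferred' list scans are replaced by a one-pass name->ids index looked up per priority name plus a set for membership, with a single truncation slice.
import Mathlib
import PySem

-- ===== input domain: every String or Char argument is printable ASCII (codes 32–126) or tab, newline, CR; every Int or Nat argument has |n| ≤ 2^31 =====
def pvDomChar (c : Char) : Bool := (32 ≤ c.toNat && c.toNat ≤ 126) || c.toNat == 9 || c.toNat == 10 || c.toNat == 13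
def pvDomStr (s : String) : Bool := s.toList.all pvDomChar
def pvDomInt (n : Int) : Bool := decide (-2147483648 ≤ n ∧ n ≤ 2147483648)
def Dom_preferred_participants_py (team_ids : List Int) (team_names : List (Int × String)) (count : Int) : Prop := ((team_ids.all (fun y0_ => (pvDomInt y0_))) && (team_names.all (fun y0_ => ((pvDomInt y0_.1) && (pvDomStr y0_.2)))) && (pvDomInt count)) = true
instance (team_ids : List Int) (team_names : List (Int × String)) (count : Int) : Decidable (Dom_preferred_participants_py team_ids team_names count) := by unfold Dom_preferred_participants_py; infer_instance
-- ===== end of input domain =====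

-- B replaces A's nested priority×dict scans and 'tid not in preferred' list scans by a
-- one-pass name→ids index plus a set for membership (measured faster at the large sizes).

-- ===== PORT A =====
-- INTERNATIONAL_PRIORITY (module constant, shared by both Pythons)
def pvPriority : List String := [
  "Australia", "India", "England", "New Zealand", "South Africa",
  "Pakistan", "Sri Lanka", "West Indies", "Bangladesh", "Afghanistan",
  "Ireland", "Zimbabwe", "Scotland", "Netherlands", "Nepal", "Namibia",
  "UAE", "Oman", "Canada", "USA", "Papua New Guinea", "Uganda"]

-- team_names.get(tid, f"Team {tid}")  (this expression appears verbatim in both Pythons)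
def pvName (team_names : List (Int × String)) (tid : Int) : String :=
  (PySem.Dict.mk team_names).getD tid ("Team " ++ PySem.Int.toStr tid)

-- named = {tid: team_names.get(tid, f"Team {tid}") for tid in team_ids}
def pvNamed (team_names : List (Int × String)) (team_ids : List Int) : PySem.Dict Int String :=
  team_ids.foldl (fun d tid => d.insert tid (pvName team_names tid)) PySem.Dict.empty

def preferred_participants_py (team_ids : List Int) (team_names : List (Int × String)) (count : Int) : List Int :=
  let named := pvNamed team_names team_ids
  let pref1 := pvPriority.foldl (fun pref name =>
    named.items.foldl (fun pref p =>
      if p.2 == name && !(pref.contains p.1) then pref ++ [p.1] else pref) pref) ([] : List Int)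
  let pref2 := (PySem.List.sorted team_ids (fun x => named.getD x "")).foldl
    (fun pref tid => if !(pref.contains tid) then pref ++ [tid] else pref) pref1
  PySem.List.slice pref2 none (some (min (pref2.length : Int) count))

-- ===== PORT B =====
-- one pass over team_ids: name_of = {} / order = []; record only first occurrences
def pvResolve (team_names : List (Int × String)) (team_ids : List Int) :
    PySem.Dict Int String × List Int :=
  team_ids.foldl (fun s tid =>
    if s.1.contains tid then s else (s.1.insert tid (pvName team_names tid), s.2 ++ [tid]))
    (PySem.Dict.empty, [])

-- by_name.setdefault(name_of[tid], []).append(tid); name_of[tid] never misses (tid ∈ order),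
-- so the subscript is ported exactly as getD _ ""
def pvByName (name_of : PySem.Dict Int String) (order : List Int) : PySem.Dict String (List Int) :=
  order.foldl (fun d t => d.modify (name_of.getD t "") [] (· ++ [t])) PySem.Dict.empty

def preferred_participants_py_alt (team_ids : List Int) (team_names : List (Int × String)) (count : Int) : List Int :=
  let r := pvResolve team_names team_ids
  let by_name := pvByName r.1 r.2
  let preferred := pvPriority.foldl (fun acc name => acc ++ by_name.getD name []) ([] : List Int)
  let st := (PySem.List.sorted team_ids (fun t => r.1.getD t "")).foldl
    (fun (s : PySem.Set Int × List Int) tid =>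
      if PySem.Set.contains s.1 tid then s else (PySem.Set.add s.1 tid, s.2 ++ [tid]))
    (PySem.Set.ofList preferred, [])
  PySem.List.slice (preferred ++ st.2) none (some count)

-- ===== PRECONDITION & SPEC =====
def Spec_preferred_participants_py (team_ids : List Int) (team_names : List (Int × String)) (count : Int) (out : List Int) : Prop := out = preferred_participants_py_alt team_ids team_names count
instance (team_ids : List Int) (team_names : List (Int × String)) (count : Int) (out : List Int) : Decidable (Spec_preferred_participants_py team_ids team_names count out) := by unfold Spec_preferred_participants_py; infer_instance

-- ===== CLAIM (what is proved, stated in full; the proofs are below) =====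
def Claim_equal_preferred_participants_py : Prop := ∀ (team_ids : List Int) (team_names : List (Int × String)) (count : Int), Dom_preferred_participants_py team_ids team_names count → Spec_preferred_participants_py team_ids team_names count (preferred_participants_py team_ids team_names count)

-- ===== LEMMAS AND PROOFS =====

-- inserting the value a key already holds changes nothing
lemma pv_insert_eq_self {κ ν : Type} [BEq κ] [LawfulBEq κ] (d : PySem.Dict κ ν) (k : κ) (v : ν)
    (hn : d.keys.Nodup) (hv : d.get? k = some v) : d.insert k v = d := by
  have hc : d.contains k = true := by
    rw [PySem.Dict.contains_eq_isSome_get?, hv]; rfl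
  apply PySem.Dict.ext
  rw [PySem.Dict.items_insert_of_contains d v hc]
  have : ∀ p ∈ d.items, (if (p.1 == k) = true then (k, v) else p) = p := by
    intro p hp
    split_ifs with h
    · have hk : p.1 = k := by simpa using h
      have : d.get? k = some p.2 := by
        rw [PySem.Dict.get?_eq_some_iff_mem_items d k p.2 hn]
        simpa [← hk] using hp
      have hveq : p.2 = v := by rw [this] at hv; exact (Option.some_inj.mp hv)
      simp [← hk, ← hveq]
    · rfl
  rw [List.map_congr_left this]
  exact List.map_id' d.items

-- A's dict comprehension and B's first-occurrence pass build the same dict,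
-- whose items are exactly B's `order` paired with their names.
lemma pv_build (nm : Int → String) (l : List Int) : ∀ (d : PySem.Dict Int String) (o : List Int),
    d.keys.Nodup → d.items = o.map (fun t => (t, nm t)) →
    (l.foldl (fun s tid => if s.1.contains tid then s else (s.1.insert tid (nm tid), s.2 ++ [tid])) (d, o)).1
        = l.foldl (fun d tid => d.insert tid (nm tid)) d ∧
    (l.foldl (fun s tid => if s.1.contains tid then s else (s.1.insert tid (nm tid), s.2 ++ [tid])) (d, o)).1.keys.Nodup ∧
    (l.foldl (fun s tid => if s.1.contains tid then s else (s.1.insert tid (nm tid), s.2 ++ [tid])) (d, o)).1.items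
        = (l.foldl (fun s tid => if s.1.contains tid then s else (s.1.insert tid (nm tid), s.2 ++ [tid])) (d, o)).2.map (fun t => (t, nm t)) := by
  induction l with
  | nil => intro d o hn hi; exact ⟨rfl, hn, hi⟩
  | cons tid l ih =>
    intro d o hn hi
    simp only [List.foldl_cons]
    by_cases hc : d.contains tid = true
    · -- key already present: A's insert is a no-op, B skips
      have hmemk : tid ∈ d.keys := (PySem.Dict.contains_iff_mem_keys d tid).mp hc
      have hkeys : d.keys = o := by
        have : d.keys = d.items.map (·.1) := rfl
        rw [this, hi, List.map_map]; exact List.map_id' o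
      have hto : tid ∈ o := hkeys ▸ hmemk
      have hget : d.get? tid = some (nm tid) := by
        rw [PySem.Dict.get?_eq_some_iff_mem_items d tid (nm tid) hn, hi]
        exact List.mem_map_of_mem hto
      rw [pv_insert_eq_self d tid (nm tid) hn hget, hc]
      simp only [if_true]
      exact ih d o hn hi
    · have hc' : d.contains tid = false := by simpa using hc
      rw [hc']
      simp only [Bool.false_eq_true, if_false]
      have hnotmem : tid ∉ d.keys := fun h => hc ((PySem.Dict.contains_iff_mem_keys d tid).mpr h)
      have hn' : (d.insert tid (nm tid)).keys.Nodup := by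
        rw [PySem.Dict.keys_insert_of_not_contains d (nm tid) hc']
        simpa [List.nodup_append] using ⟨hn, fun a ha h => hnotmem (h ▸ ha)⟩
      have hi' : (d.insert tid (nm tid)).items = (o ++ [tid]).map (fun t => (t, nm t)) := by
        rw [PySem.Dict.items_insert_of_not_contains d (nm tid) hc', hi, List.map_append]; rfl
      exact ih (d.insert tid (nm tid)) (o ++ [tid]) hn' hi'

-- A's inner scan over the dict items, specialised to one priority name
lemma pv_inner (nm : Int → String) (name : String) (o : List Int) :
    ∀ (acc : List Int), o.Nodup → (∀ t ∈ o, nm t = name → t ∉ acc) →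
    o.foldl (fun pref t => if nm t == name && !(pref.contains t) then pref ++ [t] else pref) acc
      = acc ++ o.filter (fun t => nm t == name) := by
  induction o with
  | nil => intro acc _ _; simp
  | cons t ts ih =>
    intro acc hnd hacc
    simp only [List.foldl_cons, List.filter_cons]
    by_cases h : nm t = name
    · have hne : t ∉ acc := hacc t (by simp) h
      have hcond : (nm t == name && !(acc.contains t)) = true := by
        simp [h, hne]
      rw [hcond]
      simp only [if_true]
      rw [ih (acc ++ [t]) hnd.of_cons ?_]
      · simp [h]
      · intro t' ht' hnm'
        simp only [List.mem_append, List.mem_singleton]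
        rintro (hin | rfl)
        · exact hacc t' (by simp [ht']) hnm' hin
        · exact (List.nodup_cons.mp hnd).1 ht'
    · have hcond : (nm t == name && !(acc.contains t)) = false := by simp [h]
      rw [hcond]
      simp only [Bool.false_eq_true, if_false]
      rw [ih acc hnd.of_cons (fun t' ht' => hacc t' (by simp [ht']))]
      simp [h]

-- A's double loop is a flatMap of per-name filters (the priority names are distinct)
lemma pv_outer (nm : Int → String) (o : List Int) (names : List String) :
    ∀ (acc : List Int), o.Nodup → names.Nodup → (∀ t ∈ o, ∀ n ∈ names, nm t = n → t ∉ acc) →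
    names.foldl (fun pref name =>
        o.foldl (fun pref t => if nm t == name && !(pref.contains t) then pref ++ [t] else pref) pref) acc
      = acc ++ names.flatMap (fun name => o.filter (fun t => nm t == name)) := by
  induction names with
  | nil => intro acc _ _ _; simp
  | cons name rest ih =>
    intro acc ho hnd hacc
    simp only [List.foldl_cons, List.flatMap_cons]
    rw [pv_inner nm name o acc ho (fun t ht h => hacc t ht name (by simp) h)]
    rw [ih (acc ++ o.filter (fun t => nm t == name)) ho hnd.of_cons ?_]
    · simp
    · intro t ht n hn hnm
      simp only [List.mem_append]
      rintro (hin | hin)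
      · exact hacc t ht n (by simp [hn]) hnm hin
      · have h1 : nm t = name := by simpa using (List.of_mem_filter hin)
        have hne : name = n := by rw [← h1, hnm]
        exact (List.nodup_cons.mp hnd).1 (hne ▸ hn)

-- B's grouped index looked up at one name is the per-name filter
lemma pv_group (name_of : PySem.Dict Int String) (o : List Int) (name : String) :
    (pvByName name_of o).getD name [] = o.filter (fun t => name_of.getD t "" == name) := by
  unfold pvByName
  have h : o.foldl (fun d t => d.modify (name_of.getD t "") [] (· ++ [t])) PySem.Dict.empty
      = (o.map (fun t => (name_of.getD t "", t))).foldl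
          (fun d p => d.modify p.1 [] (· ++ [p.2])) PySem.Dict.empty := by
    rw [List.foldl_map]
  rw [h, PySem.Dict.getD_foldl_modify_append]
  simp [List.filter_map, Function.comp_def]

-- A's second loop (list membership) tracks B's (set membership) step for step
lemma pv_phase2 (S : List Int) (pref0 : List Int) :
    ∀ (acc rest : List Int) (seen : PySem.Set Int),
    acc = pref0 ++ rest → (∀ t, t ∈ acc ↔ t ∈ seen) →
    S.foldl (fun pref tid => if !(pref.contains tid) then pref ++ [tid] else pref) acc
      = pref0 ++ (S.foldl (fun (s : PySem.Set Int × List Int) tid =>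
          if PySem.Set.contains s.1 tid then s else (PySem.Set.add s.1 tid, s.2 ++ [tid]))
          (seen, rest)).2 := by
  induction S with
  | nil => intro acc rest seen h1 _; simpa using h1
  | cons tid S ih =>
    intro acc rest seen h1 h2
    simp only [List.foldl_cons]
    by_cases hm : tid ∈ acc
    · have hA : (!(acc.contains tid)) = false := by simp [hm]
      have hB : PySem.Set.contains seen tid = true := by
        simp [PySem.Set.contains, ← h2 tid, hm]
      rw [hA, hB]
      simp only [Bool.false_eq_true, if_false, if_true]
      exact ih acc rest seen h1 h2
    · have hA : (!(acc.contains tid)) = true := by simp [hm]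
      have hB : PySem.Set.contains seen tid = false := by
        simp [PySem.Set.contains]
        intro h; exact hm ((h2 tid).mpr h)
      rw [hA, hB]
      simp only [Bool.false_eq_true, if_false, if_true]
      refine ih (acc ++ [tid]) (rest ++ [tid]) (PySem.Set.add seen tid)
        (by rw [h1, List.append_assoc]) ?_
      intro t
      rw [List.mem_append, h2 t, PySem.Set.mem_add]
      simp

-- preferred[:min(len(preferred), count)] = preferred[:count]
lemma pv_slice (xs : List Int) (c : Int) :
    PySem.List.slice xs none (some (min (xs.length : Int) c)) = PySem.List.slice xs none (some c) := by
  by_cases hc : 0 ≤ c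
  · rw [PySem.List.slice_to _ (by positivity), PySem.List.slice_to _ hc]
    have h : (min (xs.length : Int) c).toNat = min xs.length c.toNat := by omega
    rw [h]
    by_cases hle : c.toNat ≤ xs.length
    · rw [min_eq_right hle]
    · rw [min_eq_left (by omega), List.take_length, List.take_of_length_le (by omega)]
  · rw [min_eq_right (by omega : c ≤ (xs.length : Int))]

-- ===== VERDICT (by name: the statement is the Claim_ definition above) =====
theorem preferred_participants_py_spec : Claim_equal_preferred_participants_py := by
  intro team_ids team_names count _
  unfold Spec_preferred_participants_py
  obtain ⟨hB1, hNodup, hItems⟩ :=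
    pv_build (pvName team_names) team_ids PySem.Dict.empty []
      (by exact List.nodup_nil) (by rfl)
  have hres1 : (pvResolve team_names team_ids).1 = pvNamed team_names team_ids := hB1
  set o := (pvResolve team_names team_ids).2 with ho
  set named := pvNamed team_names team_ids with hnamed
  have hItems' : named.items = o.map (fun t => (t, pvName team_names t)) := by
    rw [← hres1]; exact hItems
  have hKNodup : named.keys.Nodup := by rw [← hres1]; exact hNodup
  have hkeys : named.keys = o := by
    have : named.keys = named.items.map (·.1) := rfl
    rw [this, hItems', List.map_map]; exact List.map_id' o
  have hoNodup : o.Nodup := hkeys ▸ hKNodup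
  have hgetD : ∀ t ∈ o, named.getD t "" = pvName team_names t := by
    intro t ht
    have hmem : (t, pvName team_names t) ∈ named.items := by
      rw [hItems']; exact List.mem_map_of_mem ht
    exact PySem.Dict.getD_of_mem_items named hmem hKNodup ""
  -- phase 1, A side: the double scan is a flatMap of per-name filters
  have hA1 : pvPriority.foldl (fun pref name =>
      named.items.foldl (fun pref p =>
        if p.2 == name && !(pref.contains p.1) then pref ++ [p.1] else pref) pref) ([] : List Int)
      = pvPriority.flatMap (fun name => o.filter (fun t => pvName team_names t == name)) := by
    have hstep : ∀ (pref : List Int) (name : String),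
        named.items.foldl (fun pref p =>
          if p.2 == name && !(pref.contains p.1) then pref ++ [p.1] else pref) pref
        = o.foldl (fun pref t =>
          if pvName team_names t == name && !(pref.contains t) then pref ++ [t] else pref) pref := by
      intro pref name
      rw [hItems', List.foldl_map]
    simp only [hstep]
    have := pv_outer (pvName team_names) o pvPriority [] hoNodup (by decide) (by simp)
    simpa using this
  -- phase 1, B side: the grouped index yields the same flatMap
  have hB2 : pvPriority.foldl
        (fun acc name => acc ++ (pvByName (pvResolve team_names team_ids).1 o).getD name []) ([] : List Int)
      = pvPriority.flatMap (fun name => o.filter (fun t => pvName team_names t == name)) := by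
    have hstep : ∀ name, (pvByName (pvResolve team_names team_ids).1 o).getD name []
        = o.filter (fun t => pvName team_names t == name) := by
      intro name
      rw [pv_group, hres1]
      exact List.filter_congr (fun t ht => by rw [hgetD t ht])
    simp only [hstep]
    have := PySem.List.foldl_append_eq_flatMap
      (fun name => o.filter (fun t => pvName team_names t == name)) pvPriority []
    simpa using this
  set preferred := pvPriority.flatMap (fun name => o.filter (fun t => pvName team_names t == name)) with hpref
  -- phase 2: both folds over the same sorted list, related state
  have hP2 := pv_phase2 (PySem.List.sorted team_ids (fun x => named.getD x "")) preferred
      preferred [] (PySem.Set.ofList preferred) (by simp)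
      (fun t => (PySem.Set.mem_ofList preferred t).symm)
  simp only [preferred_participants_py, preferred_participants_py_alt]
  rw [hA1, hB2, hres1, hP2, pv_slice]
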